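-- pv_equiv track=rewrite | github.com/baekjoon-algorithm/summer_algo | 112224/6주차/P_직업군 추천하기.py | solution
-- ===== SOURCE A (Python) =====
-- def solution(table, languages, preference):
--     score = []
--     domain = []
--
--     for i in range(len(table)):
--         ele = table[i].split()
--         domain.append((ele[0], i))
--
--         domain_score = dict()
--         val = 5
--         for key in ele[1:]:
--             domain_score[key] = val
--             val -= 1
--         score.append(domain_score)
--
--     domain.sort()
--     answer, value = '', 0
--     for dom, key in domain:
--         now = score[key]
--         ret = 0
--         for lang, pre in zip(languages, preference):
--             if lang in now:
--                 ret += now[lang] * pre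
--         if ret > value:
--             value = ret
--             answer = dom
--     return answer
-- ===== SOURCE B (Python) =====
-- def solution(table, languages, preference):
--     # single pass, no sort: keep the best candidate as a (-score, name, index) triple;
--     # min under tuple order = highest score, ties to alphabetically smallest name.
--     best = None
--     for i, row in enumerate(table):
--         name, *langs = row.split()
--         ranks = {}
--         for j, lang in enumerate(langs):
--             ranks[lang] = 5 - j
--         s = sum(ranks[l] * p for l, p in zip(languages, preference) if l in ranks)
--         cand = (-s, name, i)
--         if best is None or cand < best:
--             best = cand
--     if best is not None and best[0] < 0:
--         return best[1]
--     return ''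
-- ===== Notes on version B (the rewrite author's own statement) =====
-- stated objective: alternative
-- what changed: Replaces the sort-then-strict-max scan over (name,index) pairs (with a separate score list indexed back into) by a single pass that keeps one running best candidate as a (-score, name, index) triple under tuple order, dropping the sort and the auxiliary lists entirely.
import Mathlib
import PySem

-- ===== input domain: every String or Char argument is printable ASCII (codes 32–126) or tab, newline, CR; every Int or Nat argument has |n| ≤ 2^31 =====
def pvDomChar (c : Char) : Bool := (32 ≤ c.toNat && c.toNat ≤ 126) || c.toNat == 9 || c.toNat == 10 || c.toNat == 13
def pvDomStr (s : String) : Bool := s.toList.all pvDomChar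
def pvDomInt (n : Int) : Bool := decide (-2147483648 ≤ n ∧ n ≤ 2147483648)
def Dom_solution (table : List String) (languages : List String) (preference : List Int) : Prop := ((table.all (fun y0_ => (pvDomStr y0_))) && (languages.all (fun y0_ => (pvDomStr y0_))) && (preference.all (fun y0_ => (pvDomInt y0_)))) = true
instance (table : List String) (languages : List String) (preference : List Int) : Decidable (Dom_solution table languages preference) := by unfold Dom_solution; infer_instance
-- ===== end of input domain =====

-- B replaces A's sort-then-strict-max scan by one sortless pass keeping the best (-score, name, index) triple (objective: alternative).

-- ===== PORT A =====
def solution (table : List String) (languages : List String) (preference : List Int) : String :=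
  let st := (PySem.List.enumerate table).foldl
    (fun (st : List (PySem.Dict String Int) × List (String × Int)) (p : Int × String) =>
      let ele := PySem.Str.split₀ p.2
      -- ele[0]: Pre_solution excludes rows whose split() is empty (Python IndexError)
      let domain := st.2 ++ [(ele.headD "", p.1)]
      let ds := ((ele.drop 1).foldl
        (fun (q : PySem.Dict String Int × Int) key => (q.1.insert key q.2, q.2 - 1))
        (PySem.Dict.empty, (5 : Int))).1
      (st.1 ++ [ds], domain))
    ([], [])
  let score := st.1
  let domain := PySem.List.sorted2 st.2 (fun p => p.1) (fun p => p.2) false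
  let fin := domain.foldl
    (fun (av : String × Int) (p : String × Int) =>
      let now := (PySem.List.pyGet? score p.2).getD PySem.Dict.empty
      let ret := (languages.zip preference).foldl
        (fun (r : Int) (lp : String × Int) =>
          if now.contains lp.1 then r + (now.getD lp.1 0) * lp.2 else r) 0
      if av.2 < ret then (p.1, ret) else av)
    ("", 0)
  fin.1

-- ===== PORT B =====
-- Python tuple '<' on (int, str, int)
def pyTupleLt (a b : Int × String × Int) : Bool :=
  decide (a.1 < b.1) ||
    (decide (a.1 = b.1) &&
      (decide (a.2.1 < b.2.1) || (decide (a.2.1 = b.2.1) && decide (a.2.2 < b.2.2))))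

def solution_alt (table : List String) (languages : List String) (preference : List Int) : String :=
  let best := (PySem.List.enumerate table).foldl
    (fun (best : Option (Int × String × Int)) (p : Int × String) =>
      match PySem.Str.split₀ p.2 with
      | [] => best   -- Python raises here; excluded by Pre_solution
      | name :: langs =>
        let ranks := (PySem.List.enumerate langs).foldl
          (fun (d : PySem.Dict String Int) (q : Int × String) => d.insert q.2 (5 - q.1))
          PySem.Dict.empty
        let s := (languages.zip preference).foldl
          (fun (r : Int) (lp : String × Int) =>
            if ranks.contains lp.1 then r + (ranks.getD lp.1 0) * lp.2 else r) 0
        let cand := (-s, name, p.1)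
        match best with
        | none => some cand
        | some b => if pyTupleLt cand b then cand else b)
    none
  match best with
  | none => ""
  | some b => if b.1 < 0 then b.2.1 else ""

-- ===== PRECONDITION & SPEC =====
-- Pre_ excludes exactly the rows whose split() is empty: there A (ele[0]) and B (unpacking) both raise IndexError/ValueError.
def Pre_solution (table : List String) (languages : List String) (preference : List Int) : Prop :=
  (table.all (fun r => !(PySem.Str.split₀ r).isEmpty)) = true
instance (table : List String) (languages : List String) (preference : List Int) : Decidable (Pre_solution table languages preference) := by unfold Pre_solution; infer_instance

def pvWitness_solution : List String × List String × List Int := (["si java c", "hr py"], ["java", "py"], [4, 2])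

def Spec_solution (table : List String) (languages : List String) (preference : List Int) (out : String) : Prop := out = solution_alt table languages preference
instance (table : List String) (languages : List String) (preference : List Int) (out : String) : Decidable (Spec_solution table languages preference out) := by unfold Spec_solution; infer_instance

-- ===== CLAIM (what is proved, stated in full; the proofs are below) =====
def Claim_equal_solution : Prop := ∀ (table : List String) (languages : List String) (preference : List Int), Dom_solution table languages preference → Pre_solution table languages preference → Spec_solution table languages preference (solution table languages preference)

-- ===== LEMMAS AND PROOFS =====

-- proof-side abstractions
def rowDict (r : String) : PySem.Dict String Int :=
  (((PySem.Str.split₀ r).drop 1).foldl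
    (fun (q : PySem.Dict String Int × Int) key => (q.1.insert key q.2, q.2 - 1))
    (PySem.Dict.empty, (5 : Int))).1

def rowScore (languages : List String) (preference : List Int) (d : PySem.Dict String Int) : Int :=
  (languages.zip preference).foldl
    (fun (r : Int) (lp : String × Int) =>
      if d.contains lp.1 then r + (d.getD lp.1 0) * lp.2 else r) 0

def candOf (languages : List String) (preference : List Int) (p : Int × String) : Int × String × Int :=
  (-(rowScore languages preference (rowDict p.2)), (PySem.Str.split₀ p.2).headD "", p.1)

def cands (table : List String) (languages : List String) (preference : List Int) : List (Int × String × Int) :=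
  (PySem.List.enumerate table).map (candOf languages preference)

def minStep (b : Option (Int × String × Int)) (t : Int × String × Int) : Option (Int × String × Int) :=
  match b with
  | none => some t
  | some b0 => if pyTupleLt t b0 then t else b0

def scanStep (av : String × Int) (t : Int × String × Int) : String × Int :=
  if av.2 < -t.1 then (t.2.1, -t.1) else av

def trip (table : List String) (languages : List String) (preference : List Int) (p : String × Int) : Int × String × Int :=
  (-(rowScore languages preference (rowDict ((PySem.List.pyGet? table p.2).getD ""))), p.1, p.2)

def tkey (t : Int × String × Int) : Lex (Int × Lex (String × Int)) := toLex (t.1, toLex (t.2.1, t.2.2))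
def pk (t : Int × String × Int) : Lex (String × Int) := toLex (t.2.1, t.2.2)

def pvRel (b : Option (Int × String × Int)) (av : String × Int) : Prop :=
  match b with
  | none => av = ("", 0)
  | some t => (t.1 < 0 → av = (t.2.1, -t.1)) ∧ (0 ≤ t.1 → av = ("", 0))

theorem tkey_lt_iff (x y : Int × String × Int) :
    tkey x < tkey y ↔ x.1 < y.1 ∨ (x.1 = y.1 ∧ pk x < pk y) := by
  simp [tkey, pk, Prod.Lex.lt_iff]

theorem tkey_inj (x y : Int × String × Int) (h : tkey x = tkey y) : x = y := by
  simp only [tkey, toLex_inj, Prod.mk.injEq] at h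
  obtain ⟨h1, h2, h3⟩ := h
  exact Prod.ext h1 (Prod.ext h2 h3)

theorem pyTupleLt_iff (a b : Int × String × Int) : pyTupleLt a b = true ↔ tkey a < tkey b := by
  simp [pyTupleLt, tkey, Prod.Lex.lt_iff]

-- B's ranks dict (enumerate, 5 - j) equals A's counter dict
theorem ranks_eq (l : List String) : ∀ (j : Int) (d : PySem.Dict String Int),
    (PySem.List.enumerate l j).foldl (fun d (q : Int × String) => d.insert q.2 (5 - q.1)) d
      = (l.foldl (fun (q : PySem.Dict String Int × Int) key => (q.1.insert key q.2, q.2 - 1)) (d, 5 - j)).1 := by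
  induction l with
  | nil => intro j d; simp [PySem.List.enumerate]
  | cons h t ih =>
    intro j d
    rw [PySem.List.enumerate_cons]
    simp only [List.foldl_cons]
    have e : (5:Int) - (j + 1) = 5 - j - 1 := by omega
    rw [ih (j + 1), e]

-- A's first loop builds the score list and the (name, index) list
theorem phase1 (table : List String) : ∀ (j : Int) (s0 : List (PySem.Dict String Int)) (d0 : List (String × Int)),
    (PySem.List.enumerate table j).foldl
      (fun (st : List (PySem.Dict String Int) × List (String × Int)) (p : Int × String) =>
        let ele := PySem.Str.split₀ p.2
        let domain := st.2 ++ [(ele.headD "", p.1)]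
        let ds := ((ele.drop 1).foldl
          (fun (q : PySem.Dict String Int × Int) key => (q.1.insert key q.2, q.2 - 1))
          (PySem.Dict.empty, (5 : Int))).1
        (st.1 ++ [ds], domain))
      (s0, d0)
    = (s0 ++ table.map rowDict,
       d0 ++ (PySem.List.enumerate table j).map (fun p => ((PySem.Str.split₀ p.2).headD "", p.1))) := by
  induction table with
  | nil => intro j s0 d0; simp [PySem.List.enumerate]
  | cons h t ih =>
    intro j s0 d0
    rw [PySem.List.enumerate_cons]
    simp only [List.foldl_cons, List.map_cons]
    rw [ih (j + 1)]
    simp [rowDict, List.append_assoc]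

-- B's loop is the minStep fold over the candidate triples
theorem bfold (languages : List String) (preference : List Int) (table : List String) :
    ∀ (j : Int) (b : Option (Int × String × Int)), (∀ r ∈ table, PySem.Str.split₀ r ≠ []) →
    (PySem.List.enumerate table j).foldl
      (fun (best : Option (Int × String × Int)) (p : Int × String) =>
        match PySem.Str.split₀ p.2 with
        | [] => best
        | name :: langs =>
          let ranks := (PySem.List.enumerate langs).foldl
            (fun (d : PySem.Dict String Int) (q : Int × String) => d.insert q.2 (5 - q.1))
            PySem.Dict.empty
          let s := (languages.zip preference).foldl
            (fun (r : Int) (lp : String × Int) =>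
              if ranks.contains lp.1 then r + (ranks.getD lp.1 0) * lp.2 else r) 0
          let cand := (-s, name, p.1)
          match best with
          | none => some cand
          | some b => if pyTupleLt cand b then cand else b) b
    = ((PySem.List.enumerate table j).map (candOf languages preference)).foldl minStep b := by
  induction table with
  | nil => intro j b _; simp [PySem.List.enumerate]
  | cons h t ih =>
    intro j b hpre
    obtain ⟨name, langs, hsp⟩ := List.exists_cons_of_ne_nil (hpre h (by simp))
    rw [PySem.List.enumerate_cons]
    simp only [List.foldl_cons, List.map_cons]
    rw [ih (j + 1) _ (fun r hr => hpre r (List.mem_cons_of_mem _ hr))]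
    congr 1
    show (match PySem.Str.split₀ h with
      | [] => b
      | name :: langs =>
        let ranks := (PySem.List.enumerate langs).foldl
          (fun (d : PySem.Dict String Int) (q : Int × String) => d.insert q.2 (5 - q.1))
          PySem.Dict.empty
        let s := (languages.zip preference).foldl
          (fun (r : Int) (lp : String × Int) =>
            if ranks.contains lp.1 then r + (ranks.getD lp.1 0) * lp.2 else r) 0
        let cand := (-s, name, j)
        match b with
        | none => some cand
        | some b => if pyTupleLt cand b then cand else b) = minStep b (candOf languages preference (j, h))
    rw [hsp]
    simp only [ranks_eq langs 0 PySem.Dict.empty, candOf, rowDict, hsp, List.drop_succ_cons,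
      List.drop_zero, List.headD_cons]
    norm_num [minStep, rowScore]

-- characterization of the strict-min fold
theorem min_none (l : List (Int × String × Int)) : ∀ (b : Option (Int × String × Int)),
    l.foldl minStep b = none ↔ (l = [] ∧ b = none) := by
  induction l with
  | nil => intro b; simp
  | cons t l ih =>
    intro b
    simp only [List.foldl_cons, ih]
    constructor
    · rintro ⟨-, h⟩; cases b
      · simp [minStep] at h
      · simp only [minStep] at h; split at h <;> simp at h
    · rintro ⟨h, -⟩; simp at h

theorem minStep_spec (b : Option (Int × String × Int)) (t : Int × String × Int) :
    ∃ m, minStep b t = some m ∧ ¬ tkey t < tkey m ∧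
      (∀ b0, b = some b0 → ¬ tkey b0 < tkey m) ∧ (m = t ∨ b = some m) := by
  cases b with
  | none => exact ⟨t, rfl, lt_irrefl _, by simp, Or.inl rfl⟩
  | some b0 =>
    by_cases hlt : tkey t < tkey b0
    · refine ⟨t, ?_, lt_irrefl _, ?_, Or.inl rfl⟩
      · simp [minStep, (pyTupleLt_iff t b0).mpr hlt]
      · rintro b1 ⟨rfl⟩; exact fun h => absurd hlt (asymm h)
    · have : pyTupleLt t b0 = false := by
        rw [← Bool.not_eq_true, pyTupleLt_iff]; exact hlt
      refine ⟨b0, by simp [minStep, this], hlt, ?_, Or.inr rfl⟩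
      rintro b1 ⟨rfl⟩; exact lt_irrefl _

theorem min_spec (l : List (Int × String × Int)) : ∀ (b : Option (Int × String × Int))
    (r : Int × String × Int), l.foldl minStep b = some r →
    (∀ x ∈ l, ¬ tkey x < tkey r) ∧ (∀ b0, b = some b0 → ¬ tkey b0 < tkey r) ∧ (r ∈ l ∨ b = some r) := by
  induction l with
  | nil =>
    intro b r h
    simp only [List.foldl_nil] at h
    subst h
    exact ⟨by simp, by rintro b0 ⟨rfl⟩; exact lt_irrefl _, Or.inr rfl⟩
  | cons t l ih =>
    intro b r h
    simp only [List.foldl_cons] at h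
    obtain ⟨m, hm1, hmt, hmb, hmem⟩ := minStep_spec b t
    rw [hm1] at h
    obtain ⟨H1, H2, H3⟩ := ih (some m) r h
    have hrm : tkey r ≤ tkey m := not_lt.mp (H2 m rfl)
    refine ⟨?_, ?_, ?_⟩
    · intro x hx
      rcases List.mem_cons.mp hx with rfl | hx'
      · exact not_lt.mpr (hrm.trans (not_lt.mp hmt))
      · exact H1 x hx'
    · intro b0 hb0
      exact not_lt.mpr (hrm.trans (not_lt.mp (hmb b0 hb0)))
    · rcases H3 with hr | hbm
      · exact Or.inl (List.mem_cons_of_mem _ hr)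
      · obtain ⟨rfl⟩ : m = r := by injection hbm
        rcases hmem with rfl | hb
        · exact Or.inl (List.mem_cons_self ..)
        · exact Or.inr hb

theorem min_perm (l1 l2 : List (Int × String × Int)) (hp : l1.Perm l2) :
    l1.foldl minStep none = l2.foldl minStep none := by
  cases h1 : l1.foldl minStep none with
  | none =>
    have hnil : l1 = [] := ((min_none l1 none).mp h1).1
    subst hnil
    rw [(min_none l2 none).mpr ⟨hp.symm.eq_nil, rfl⟩]
  | some r1 =>
    cases h2 : l2.foldl minStep none with
    | none =>
      have := ((min_none l2 none).mp h2).1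
      subst this
      have := hp.eq_nil
      subst this
      simp at h1
    | some r2 =>
      obtain ⟨M1, -, Mem1⟩ := min_spec l1 none r1 h1
      obtain ⟨M2, -, Mem2⟩ := min_spec l2 none r2 h2
      have hr1 : r1 ∈ l1 := by rcases Mem1 with h | h; exact h; simp at h
      have hr2 : r2 ∈ l2 := by rcases Mem2 with h | h; exact h; simp at h
      have h12 : ¬ tkey r2 < tkey r1 := M1 r2 (hp.mem_iff.mpr hr2)
      have h21 : ¬ tkey r1 < tkey r2 := M2 r1 (hp.mem_iff.mp hr1)
      rw [tkey_inj r1 r2 (le_antisymm (not_lt.mp h12) (not_lt.mp h21))]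

-- domain.sort() = sorted by the lexicographic pair key
theorem sorted2_eq_sorted_lex (xs : List (String × Int)) :
    PySem.List.sorted2 xs (fun p => p.1) (fun p => p.2) false
      = PySem.List.sorted xs (fun p => toLex (p.1, p.2)) false := by
  have hb : (fun (a b : String × Int) =>
        decide (a.1 < b.1) || (!decide (b.1 < a.1) && decide (a.2 < b.2)))
      = (fun (a b : String × Int) => decide (toLex (a.1, a.2) < toLex (b.1, b.2))) := by
    funext a b
    rw [Bool.eq_iff_iff]
    simp only [Bool.or_eq_true, Bool.and_eq_true, Bool.not_eq_true', decide_eq_true_eq,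
      decide_eq_false_iff_not, Prod.Lex.lt_iff]
    constructor
    · rintro (h | ⟨h1, h2⟩)
      · exact Or.inl h
      · rcases lt_or_eq_of_le (not_lt.mp h1) with h | h
        · exact Or.inl h
        · exact Or.inr ⟨h, h2⟩
    · rintro (h | ⟨h1, h2⟩)
      · exact Or.inl h
      · have h1' : a.1 = b.1 := h1
        exact Or.inr ⟨not_lt.mpr (le_of_eq h1'), h2⟩
  simp only [PySem.List.sorted2, PySem.List.sorted, if_neg (Bool.false_ne_true)]
  rw [hb]

-- the scan-vs-min invariant on a (name,index)-sorted list
theorem scan_rel (L : List (Int × String × Int)) : ∀ (b : Option (Int × String × Int)) (av : String × Int),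
    L.Pairwise (fun a b => pk a ≤ pk b) →
    (∀ x ∈ L, ∀ b0, b = some b0 → pk b0 ≤ pk x) →
    pvRel b av →
    pvRel (L.foldl minStep b) (L.foldl scanStep av) := by
  induction L with
  | nil => intro b av _ _ h; exact h
  | cons t L ih =>
    intro b av hpw hle hrel
    obtain ⟨hhead, htail⟩ := List.pairwise_cons.mp hpw
    simp only [List.foldl_cons]
    have hle' : ∀ x ∈ L, ∀ b0, minStep b t = some b0 → pk b0 ≤ pk x := by
      intro x hx b0 hb0
      cases b with
      | none =>
        obtain ⟨rfl⟩ : t = b0 := by simpa [minStep] using hb0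
        exact hhead x hx
      | some c =>
        simp only [minStep] at hb0
        split at hb0
        · obtain ⟨rfl⟩ : t = b0 := by simpa using hb0
          exact hhead x hx
        · obtain ⟨rfl⟩ : c = b0 := by simpa using hb0
          exact hle x (List.mem_cons_of_mem _ hx) b0 rfl
    have hrel' : pvRel (minStep b t) (scanStep av t) := by
      cases b with
      | none =>
        have hav : av = ("", 0) := hrel
        subst hav
        by_cases ht : t.1 < 0
        · have : ((("", 0) : String × Int)).2 < -t.1 := by simpa using ht
          simp only [minStep, scanStep, if_pos this, pvRel]
          exact ⟨fun _ => trivial, fun h => absurd h (not_le.mpr ht)⟩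
        · have : ¬ ((("", 0) : String × Int)).2 < -t.1 := by simpa using ht
          simp only [minStep, scanStep, if_neg this, pvRel]
          exact ⟨fun h => absurd h ht, fun _ => trivial⟩
      | some c =>
        have hcle : pk c ≤ pk t := hle t (List.mem_cons_self ..) c rfl
        by_cases hlt : tkey t < tkey c
        · have ht1 : t.1 < c.1 := by
            rcases (tkey_lt_iff t c).mp hlt with h | ⟨-, h⟩
            · exact h
            · exact absurd h (not_lt.mpr hcle)
          have hstep : minStep (some c) t = some t := by
            simp [minStep, (pyTupleLt_iff t c).mpr hlt]
          rw [hstep]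
          by_cases hc : c.1 < 0
          · have hav : av = (c.2.1, -c.1) := hrel.1 hc
            subst hav
            have hcond : ((c.2.1, -c.1) : String × Int).2 < -t.1 := by simp; omega
            simp only [scanStep, if_pos hcond, pvRel]
            exact ⟨fun _ => trivial, fun h => absurd h (by omega)⟩
          · have hav : av = ("", 0) := hrel.2 (not_lt.mp hc)
            subst hav
            by_cases ht : t.1 < 0
            · have hcond : ((("", 0) : String × Int)).2 < -t.1 := by simpa using ht
              simp only [scanStep, if_pos hcond, pvRel]
              exact ⟨fun _ => trivial, fun h => absurd h (not_le.mpr ht)⟩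
            · have hcond : ¬ ((("", 0) : String × Int)).2 < -t.1 := by simpa using ht
              simp only [scanStep, if_neg hcond, pvRel]
              exact ⟨fun h => absurd h ht, fun _ => trivial⟩
        · have hstep : minStep (some c) t = some c := by
            have : pyTupleLt t c = false := by
              rw [← Bool.not_eq_true, pyTupleLt_iff]; exact hlt
            simp [minStep, this]
          rw [hstep]
          have hnot : ¬ t.1 < c.1 := by
            intro h
            exact hlt ((tkey_lt_iff t c).mpr (Or.inl h))
          by_cases hc : c.1 < 0
          · have hav : av = (c.2.1, -c.1) := hrel.1 hc
            subst hav
            have hcond : ¬ ((c.2.1, -c.1) : String × Int).2 < -t.1 := by simp; omega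
            simp only [scanStep, if_neg hcond]
            exact hrel
          · have hav : av = ("", 0) := hrel.2 (not_lt.mp hc)
            subst hav
            have hcond : ¬ ((("", 0) : String × Int)).2 < -t.1 := by simp; omega
            simp only [scanStep, if_neg hcond]
            exact hrel
    exact ih (minStep b t) (scanStep av t) htail hle' hrel' 

theorem lookup_dict (table : List String) (k : Nat) (h : k < table.length) :
    (PySem.List.pyGet? (table.map rowDict) (k : Int)).getD PySem.Dict.empty = rowDict table[k] := by
  rw [PySem.List.pyGet?_natCast]
  simp [List.getElem?_eq_getElem (by simpa using h)]

theorem lookup_str (table : List String) (k : Nat) (h : k < table.length) :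
    (PySem.List.pyGet? table (k : Int)).getD "" = table[k] := by
  rw [PySem.List.pyGet?_natCast]
  simp [List.getElem?_eq_getElem h]

-- ===== VERDICT (by name: the statement is the Claim_ definition above) =====
theorem solution_spec : Claim_equal_solution := by
  intro table languages preference _ hpre
  show solution table languages preference = solution_alt table languages preference
  have hne : ∀ r ∈ table, PySem.Str.split₀ r ≠ [] := by
    intro r hr
    have := List.all_eq_true.mp hpre r hr
    simpa [List.isEmpty_iff] using this
  -- the (name, index) list and its sort
  set dAbs := (PySem.List.enumerate table).map
    (fun p => ((PySem.Str.split₀ p.2).headD "", p.1)) with hdAbs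
  set sD := PySem.List.sorted2 dAbs (fun p => p.1) (fun p => p.2) false with hsD
  have hmemD : ∀ p ∈ dAbs, ∃ k : Nat, ∃ _ : k < table.length,
      p = ((PySem.Str.split₀ table[k]).headD "", (k : Int)) := by
    intro p hp
    obtain ⟨q, hq, rfl⟩ := List.mem_map.mp hp
    obtain ⟨k, h, rfl⟩ := (PySem.List.mem_enumerate_iff table 0 q).mp hq
    exact ⟨k, h, by simp⟩
  have hpermSD : sD.Perm dAbs := PySem.List.sorted2_perm dAbs _ _ false
  -- A's value
  have hA : solution table languages preference
      = ((sD.map (trip table languages preference)).foldl scanStep ("", 0)).1 := by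
    unfold solution
    simp only [phase1 table 0 [] [], List.nil_append, ← hdAbs, ← hsD]
    rw [PySem.List.foldl_congr_mem sD _
      (fun av p => scanStep av (trip table languages preference p)) ("", 0) ?_]
    · rw [List.foldl_map]
    · intro av p hp
      obtain ⟨k, hk, rfl⟩ := hmemD p (hpermSD.mem_iff.mp hp)
      simp only [scanStep, trip, lookup_dict table k hk, lookup_str table k hk, neg_neg,
        rowScore]
  -- B's value
  have hB : solution_alt table languages preference
      = (match (cands table languages preference).foldl minStep none with
         | none => ""
         | some b => if b.1 < 0 then b.2.1 else "") := by
    unfold solution_alt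
    rw [bfold languages preference table 0 none hne]
    rfl
  -- the sorted candidate list is a permutation of the unsorted one
  have hmapeq : dAbs.map (trip table languages preference)
      = cands table languages preference := by
    rw [hdAbs, List.map_map]
    apply List.map_congr_left
    intro q hq
    obtain ⟨k, hk, rfl⟩ := (PySem.List.mem_enumerate_iff table 0 q).mp hq
    simp only [Function.comp, trip, candOf, zero_add, lookup_str table k hk]
  have hperm : (sD.map (trip table languages preference)).Perm
      (cands table languages preference) := hmapeq ▸ hpermSD.map _
  -- sortedness of the mapped list in the (name, index) key
  have hpw : (sD.map (trip table languages preference)).Pairwise (fun a b => pk a ≤ pk b) := by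
    rw [List.pairwise_map]
    have := PySem.List.sorted_pairwise dAbs (fun p : String × Int => toLex (p.1, p.2))
    rw [hsD, sorted2_eq_sorted_lex]
    exact this.imp (fun h => h)
  -- run the invariant and the permutation argument
  have hscan := scan_rel (sD.map (trip table languages preference)) none ("", 0) hpw
    (by simp) rfl
  rw [min_perm _ _ hperm] at hscan
  rw [hA, hB]
  rcases hres : (cands table languages preference).foldl minStep none with - | t
  · rw [hres] at hscan
    have : (sD.map (trip table languages preference)).foldl scanStep ("", 0) = ("", 0) := hscan
    rw [this]
  · rw [hres] at hscan
    obtain ⟨h1, h2⟩ := hscan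
    by_cases ht : t.1 < 0
    · rw [h1 ht]
      simp [ht]
    · rw [h2 (not_lt.mp ht)]
      simp [ht]
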